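-- pv_equiv track=rewrite | github.com/Just-a-lurker/HCSTT | MoToSuyDien.py | prune_vet
-- ===== SOURCE A (Python) =====
-- from typing import List, Tuple, Set
-- from typing import List, Tuple, Set
--
-- Rule = Tuple[Set[str], Set[str]]
--
-- def prune_vet(VET: List[Rule], TG0: Set[str], KL: Set[str]) -> List[Rule]:
--     needed = set(KL)
--     used: List[Rule] = []
--     for left, right in reversed(VET):
--         if right & needed:
--             used.insert(0, (left, right))
--             needed |= left
--     return used
-- ===== SOURCE B (Python) =====
-- def prune_vet(VET, TG0, KL):
--     # Divide and conquer: solve(rules, needed) prunes a contiguous block given the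
--     # needed-set coming from the rules to its right, returning the kept rules (in
--     # order) and the needed-set propagated to the left.  Correct because the
--     # backward needed-propagation composes: needed flows right half -> left half.
--     def solve(rules, needed):
--         if not rules:
--             return [], needed
--         if len(rules) == 1:
--             left, right = rules[0]
--             if right & needed:
--                 return [rules[0]], needed | left
--             return [], needed
--         mid = len(rules) // 2
--         kept_hi, n1 = solve(rules[mid:], needed)
--         kept_lo, n2 = solve(rules[:mid], n1)
--         return kept_lo + kept_hi, n2
--     return solve(VET, set(KL))[0]
-- ===== Notes on version B (the rewrite author's own statement) =====
-- stated objective: alternative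
-- what changed: Replaces A's single backward loop with insert(0) by a divide-and-conquer recursion: the rule list is split in halves, the right half is pruned first, its propagated needed-set feeds the left half, and kept halves are concatenated; correctness rests on the compositionality of the backward needed-propagation.
import Mathlib
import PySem

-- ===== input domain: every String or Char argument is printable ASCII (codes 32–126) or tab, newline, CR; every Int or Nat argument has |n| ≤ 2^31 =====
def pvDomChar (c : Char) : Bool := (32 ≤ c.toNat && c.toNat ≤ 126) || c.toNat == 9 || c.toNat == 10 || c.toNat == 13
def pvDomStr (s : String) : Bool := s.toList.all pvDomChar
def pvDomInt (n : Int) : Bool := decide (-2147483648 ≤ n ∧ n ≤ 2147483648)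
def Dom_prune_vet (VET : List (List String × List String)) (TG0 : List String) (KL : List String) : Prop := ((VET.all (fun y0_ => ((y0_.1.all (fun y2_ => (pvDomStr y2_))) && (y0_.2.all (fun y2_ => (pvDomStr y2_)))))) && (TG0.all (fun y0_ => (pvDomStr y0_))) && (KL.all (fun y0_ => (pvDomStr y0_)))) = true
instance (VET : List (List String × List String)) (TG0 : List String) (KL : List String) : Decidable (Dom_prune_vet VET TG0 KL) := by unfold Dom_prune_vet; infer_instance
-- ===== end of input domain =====

-- B replaces A's backward insert(0) loop by a divide-and-conquer recursion that threads the needed-set right-to-left across halves (alternative decomposition, same cost class).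


-- ===== PORT A =====
-- loop body of A: 'if right & needed: used.insert(0, (left, right)); needed |= left'
def pvStepA (st : PySem.Set String × List (List String × List String))
    (lr : List String × List String) : PySem.Set String × List (List String × List String) :=
  if PySem.Set.inter lr.2 st.1 ≠ [] then
    (PySem.Set.union st.1 lr.1, (lr.1, lr.2) :: st.2)
  else st

def prune_vet (VET : List (List String × List String)) (TG0 : List String) (KL : List String) : List (List String × List String) :=
  (VET.reverse.foldl pvStepA (PySem.Set.ofList KL, [])).2

-- ===== PORT B =====
-- B's 'solve(rules, needed)': divide and conquer; right half first, its needed-set feeds the left half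
def pvSolve : List (List String × List String) → PySem.Set String →
    List (List String × List String) × PySem.Set String
  | [], needed => ([], needed)
  | [lr], needed =>
    if PySem.Set.inter lr.2 needed ≠ [] then ([lr], PySem.Set.union needed lr.1)
    else ([], needed)
  | x :: y :: tl, needed =>
    let rules := x :: y :: tl
    let mid := rules.length / 2
    let ph := pvSolve (rules.drop mid) needed
    let pl := pvSolve (rules.take mid) ph.2
    (pl.1 ++ ph.1, pl.2)
termination_by rules _ => rules.length
decreasing_by
  · simp; omega
  · simp; omega

def prune_vet_alt (VET : List (List String × List String)) (TG0 : List String) (KL : List String) : List (List String × List String) :=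
  (pvSolve VET (PySem.Set.ofList KL)).1

-- ===== PRECONDITION & SPEC =====
def Spec_prune_vet (VET : List (List String × List String)) (TG0 : List String) (KL : List String) (out : List (List String × List String)) : Prop := out = prune_vet_alt VET TG0 KL
instance (VET : List (List String × List String)) (TG0 : List String) (KL : List String) (out : List (List String × List String)) : Decidable (Spec_prune_vet VET TG0 KL out) := by unfold Spec_prune_vet; infer_instance

-- ===== CLAIM (what is proved, stated in full; the proofs are below) =====
def Claim_equal_prune_vet : Prop := ∀ (VET : List (List String × List String)) (TG0 : List String) (KL : List String), Dom_prune_vet VET TG0 KL → Spec_prune_vet VET TG0 KL (prune_vet VET TG0 KL)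

-- ===== LEMMAS AND PROOFS =====

-- linear right-to-left reference recursion used only by the proofs
def pvGoLin : List (List String × List String) → PySem.Set String →
    List (List String × List String) × PySem.Set String
  | [], n => ([], n)
  | x :: xs, n =>
    let p := pvGoLin xs n
    if PySem.Set.inter x.2 p.2 ≠ [] then (x :: p.1, PySem.Set.union p.2 x.1) else p

-- the backward needed-propagation composes across concatenation
theorem pvGoLin_append (l r : List (List String × List String)) (n : PySem.Set String) :
    pvGoLin (l ++ r) n =
      ((pvGoLin l (pvGoLin r n).2).1 ++ (pvGoLin r n).1, (pvGoLin l (pvGoLin r n).2).2) := by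
  induction l with
  | nil => simp [pvGoLin]
  | cons x xs ih =>
    simp only [List.cons_append, pvGoLin, ih]
    split <;> simp

-- the divide-and-conquer recursion computes the linear recursion
theorem pvSolve_eq_goLin (rules : List (List String × List String)) (n : PySem.Set String) :
    pvSolve rules n = pvGoLin rules n := by
  induction rules, n using pvSolve.induct with
  | case1 n => rw [pvSolve]; simp [pvGoLin]
  | case2 lr n h => rw [pvSolve]; simp [pvGoLin, h]
  | case3 lr n h => rw [pvSolve]; simp [pvGoLin, h]
  | case4 x y tl n rules mid ph ih1 ih2 ih3 =>
    rw [pvSolve]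
    have ihT : pvSolve ((x :: y :: tl).take ((x :: y :: tl).length / 2))
        (pvSolve ((x :: y :: tl).drop ((x :: y :: tl).length / 2)) n).2 =
        pvGoLin ((x :: y :: tl).take ((x :: y :: tl).length / 2))
        (pvSolve ((x :: y :: tl).drop ((x :: y :: tl).length / 2)) n).2 := ih3
    rw [ih2] at ihT
    rw [ih2, ihT]
    have h := pvGoLin_append ((x :: y :: tl).take ((x :: y :: tl).length / 2))
      ((x :: y :: tl).drop ((x :: y :: tl).length / 2)) n
    rw [List.take_append_drop] at h
    rw [h]

-- A's fold over the reversed list is the linear recursion (needed, used) swapped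
theorem pvFoldA_eq_goLin (VET : List (List String × List String)) (n : PySem.Set String) :
    VET.reverse.foldl pvStepA (n, []) = ((pvGoLin VET n).2, (pvGoLin VET n).1) := by
  induction VET with
  | nil => simp [pvGoLin]
  | cons x xs ih =>
    have hA : (x :: xs).reverse.foldl pvStepA (n, []) =
        pvStepA (xs.reverse.foldl pvStepA (n, [])) x := by
      simp [List.foldl_append]
    rw [hA, ih]
    simp only [pvGoLin, pvStepA]
    split <;> simp_all

-- ===== VERDICT (by name: the statement is the Claim_ definition above) =====
theorem prune_vet_spec : Claim_equal_prune_vet := by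
  intro VET TG0 KL _
  unfold Spec_prune_vet prune_vet prune_vet_alt
  rw [pvFoldA_eq_goLin, pvSolve_eq_goLin]
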